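-- pv_equiv track=rewrite | github.com/ChristianIbaoc/TDNN-HMM-Hybrid-Cebuano | utils/syllable-processor.py | disambiguate_syllables
-- ===== SOURCE A (Python) =====
-- from collections import defaultdict
--
-- def disambiguate_syllables(syllables):
--     count = defaultdict(int)
--     result = []
--     for s in syllables:
--         count[s] += 1
--         if count[s] == 1:
--             result.append(s)
--         else:
--             result.append(f"{s}_{count[s]}")
--     return result
-- ===== SOURCE B (Python) =====
-- def disambiguate_syllables(syllables):
--     # Gather: map each syllable to the list of indices where it occurs.
--     groups = {}
--     for i, s in enumerate(syllables):
--         groups.setdefault(s, []).append(i)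
--     # Scatter: label each group's positions back into a pre-sized result.
--     result = [""] * len(syllables)
--     for s, idxs in groups.items():
--         result[idxs[0]] = s
--         for j, i in enumerate(idxs[1:], start=2):
--             result[i] = f"{s}_{j}"
--     return result
-- ===== Notes on version B (the rewrite author's own statement) =====
-- stated objective: alternative
-- what changed: Replaces A's sequential emit-with-running-counter loop by a gather/scatter two-phase algorithm: first build a dict from syllable to its list of occurrence indices, then allocate the result and scatter the bare name at each group's first index and numbered labels at the later ones.
import Mathlib
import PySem

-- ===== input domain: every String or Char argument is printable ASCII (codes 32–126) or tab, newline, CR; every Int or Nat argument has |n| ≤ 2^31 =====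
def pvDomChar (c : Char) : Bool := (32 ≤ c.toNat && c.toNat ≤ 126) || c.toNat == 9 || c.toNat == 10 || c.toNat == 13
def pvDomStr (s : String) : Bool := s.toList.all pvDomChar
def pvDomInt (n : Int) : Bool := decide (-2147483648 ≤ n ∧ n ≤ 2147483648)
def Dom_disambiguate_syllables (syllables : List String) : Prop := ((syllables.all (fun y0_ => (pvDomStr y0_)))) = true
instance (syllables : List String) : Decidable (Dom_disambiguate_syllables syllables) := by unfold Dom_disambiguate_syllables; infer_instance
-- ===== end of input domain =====

-- B replaces A's sequential emit-with-running-counter loop by a gather/scatter two-phase algorithm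
-- (group indices per syllable, then write labels back by position); same output, alternative algorithm.

-- ===== PORT A =====
def disambiguate_syllables (syllables : List String) : List String :=
  (syllables.foldl
    (fun (st : PySem.Dict String Int × List String) s =>
      let count := st.1.modify s 0 (· + 1)
      let c := count.getD s 0
      if c = 1 then (count, st.2 ++ [s])
      else (count, st.2 ++ [s ++ "_" ++ PySem.Int.toStr c]))
    (PySem.Dict.empty, [])).2

-- ===== PORT B =====
-- scatter phase for one group: 'result[idxs[0]] = s; for j, i in enumerate(idxs[1:], start=2): result[i] = f"{s}_{j}"'
-- (the [] branch is unreachable: the gather phase only creates nonempty groups)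
def pvWriteGroup (s : String) (idxs : List Int) (r : List String) : List String :=
  match idxs with
  | [] => r
  | i0 :: rest =>
    (PySem.List.enumerate rest 2).foldl
      (fun r' q => PySem.List.pySetD r' q.2 (s ++ "_" ++ PySem.Int.toStr q.1))
      (PySem.List.pySetD r i0 s)

def disambiguate_syllables_alt (syllables : List String) : List String :=
  let groups : PySem.Dict String (List Int) :=
    (PySem.List.enumerate syllables).foldl
      (fun d p => d.modify p.2 [] (· ++ [p.1])) PySem.Dict.empty
  groups.items.foldl (fun r gi => pvWriteGroup gi.1 gi.2 r)
    (List.replicate syllables.length "")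

-- ===== PRECONDITION & SPEC =====
def Spec_disambiguate_syllables (syllables : List String) (out : List String) : Prop := out = disambiguate_syllables_alt syllables
instance (syllables : List String) (out : List String) : Decidable (Spec_disambiguate_syllables syllables out) := by unfold Spec_disambiguate_syllables; infer_instance

-- ===== CLAIM (what is proved, stated in full; the proofs are below) =====
def Claim_equal_disambiguate_syllables : Prop := ∀ (syllables : List String), Dom_disambiguate_syllables syllables → Spec_disambiguate_syllables syllables (disambiguate_syllables syllables)

-- ===== LEMMAS AND PROOFS =====

-- A's loop body, named for the proofs (definitionally the lambda in port A)
def stepA (st : PySem.Dict String Int × List String) (s : String) :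
    PySem.Dict String Int × List String :=
  let count := st.1.modify s 0 (· + 1)
  let c := count.getD s 0
  if c = 1 then (count, st.2 ++ [s])
  else (count, st.2 ++ [s ++ "_" ++ PySem.Int.toStr c])

theorem A_eq (xs : List String) :
    disambiguate_syllables xs = (xs.foldl stepA (PySem.Dict.empty, [])).2 := rfl

-- The first component of A's fold is the plain counting fold, whatever the accumulator.
theorem fstA (xs : List String) (d : PySem.Dict String Int) (r : List String) :
    (xs.foldl stepA (d, r)).1 = xs.foldl (fun d s => d.modify s 0 (· + 1)) d := by
  induction xs generalizing d r with
  | nil => rfl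
  | cons x xs ih =>
    simp only [List.foldl_cons, stepA]
    split_ifs <;> exact ih _ _

-- the label both programs attach to an occurrence of x coming after prefix xs
def pvLabel (xs : List String) (x : String) : String :=
  if xs.count x = 0 then x else x ++ "_" ++ PySem.Int.toStr ((xs.count x : Int) + 1)

theorem A_append (xs : List String) (x : String) :
    disambiguate_syllables (xs ++ [x]) = disambiguate_syllables xs ++ [pvLabel xs x] := by
  rw [A_eq, A_eq, List.foldl_append, List.foldl_cons, List.foldl_nil]
  have hd : (List.foldl stepA (PySem.Dict.empty, []) xs).1.getD x 0 = (xs.count x : Int) := by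
    rw [fstA, PySem.Dict.getD_foldl_modify_add_one, PySem.Dict.getD_empty]; omega
  simp only [stepA]
  rw [PySem.Dict.getD_modify_self, hd]
  unfold pvLabel
  split_ifs with h1 h2 h2
  · rfl
  · omega
  · omega
  · rfl

-- ---- B-side characterisation (proof helpers) ----

def pvGroups (xs : List String) : PySem.Dict String (List Int) :=
  (PySem.List.enumerate xs).foldl
    (fun d p => d.modify p.2 [] (· ++ [p.1])) PySem.Dict.empty

-- the list of indices at which s occurs in xs
def posOf (xs : List String) (s : String) : List Int :=
  ((((PySem.List.enumerate xs).map (fun p => (p.2, p.1))).filter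
      (fun p => p.1 == s)).map (·.2))

theorem getD_pvGroups (xs : List String) (s : String) :
    (pvGroups xs).getD s [] = posOf xs s := by
  unfold pvGroups posOf
  rw [show (List.foldl (fun d (p : Int × String) => d.modify p.2 [] (· ++ [p.1])) PySem.Dict.empty (PySem.List.enumerate xs)) = (((PySem.List.enumerate xs).map (fun p => (p.2, p.1))).foldl (fun d (p : String × Int) => d.modify p.1 [] (· ++ [p.2])) PySem.Dict.empty) from (List.foldl_map (f := fun p : Int × String => (p.2, p.1)) (g := fun (d : PySem.Dict String (List Int)) (p : String × Int) => d.modify p.1 [] (· ++ [p.2]))).symm]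
  rw [PySem.Dict.getD_foldl_modify_append]
  simp

theorem keys_pvGroups (xs : List String) :
    (pvGroups xs).keys = PySem.Set.ofList xs := by
  unfold pvGroups
  rw [PySem.Dict.keys_foldl_modify_key (key := fun p : Int × String => p.2)]
  simp [PySem.List.map_snd_enumerate, PySem.Dict.keys_empty, PySem.Set.update, PySem.Set.ofList_eq_foldl]

theorem nodup_keys_pvGroups (xs : List String) : (pvGroups xs).keys.Nodup := by
  unfold pvGroups
  exact PySem.Dict.nodup_keys_foldl_modify_key _ _ _ _ _ PySem.Dict.nodup_keys_empty

theorem items_pvGroups (xs : List String) :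
    (pvGroups xs).items = (PySem.Set.ofList xs).map (fun s => (s, posOf xs s)) := by
  rw [PySem.Dict.items_eq_map_keys (pvGroups xs) (nodup_keys_pvGroups xs) []]
  rw [keys_pvGroups]
  exact List.map_congr_left (fun s _ => by rw [getD_pvGroups])

theorem posOf_append (xs : List String) (x s : String) :
    posOf (xs ++ [x]) s = posOf xs s ++ (if x = s then [(xs.length : Int)] else []) := by
  unfold posOf
  rw [PySem.List.enumerate_append]
  simp only [PySem.List.enumerate_cons, PySem.List.enumerate_nil, List.map_append,
    List.filter_append, List.map_cons, List.map_nil, List.filter_cons]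
  by_cases h : x = s
  · simp [h]
  · simp [h, beq_eq_false_iff_ne.mpr h]

theorem posOf_bounds (xs : List String) (s : String) (i : Int) (h : i ∈ posOf xs s) :
    0 ≤ i ∧ i < (xs.length : Int) := by
  unfold posOf at h
  simp only [List.mem_map, List.mem_filter] at h
  obtain ⟨p, ⟨hp, _⟩, rfl⟩ := h
  obtain ⟨q, hq, rfl⟩ := hp
  rcases (PySem.List.mem_enumerate_iff _ _ _).mp hq with ⟨k, hk, rfl⟩
  simp; omega

theorem posOf_length (xs : List String) (s : String) :
    (posOf xs s).length = xs.count s := by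
  induction xs using List.reverseRecOn with
  | nil => rfl
  | append_singleton xs x ih =>
    rw [posOf_append, List.length_append, ih, List.count_append]
    by_cases h : x = s <;> simp [h]

theorem posOf_eq_nil (xs : List String) (s : String) (h : s ∉ xs) : posOf xs s = [] := by
  have := posOf_length xs s
  rw [List.count_eq_zero_of_not_mem h] at this
  exact List.eq_nil_of_length_eq_zero this

theorem inner_len (L : List (Int × Int)) (s : String) (r : List String) :
    (L.foldl (fun r' q => PySem.List.pySetD r' q.2 (s ++ "_" ++ PySem.Int.toStr q.1)) r).length
      = r.length := by
  induction L generalizing r with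
  | nil => rfl
  | cons q L ih => rw [List.foldl_cons, ih, PySem.List.length_pySetD]

theorem inner_append (L : List (Int × Int)) (s : String) (r t : List String)
    (h : ∀ q ∈ L, 0 ≤ q.2 ∧ q.2 < (r.length : Int)) :
    L.foldl (fun r' q => PySem.List.pySetD r' q.2 (s ++ "_" ++ PySem.Int.toStr q.1)) (r ++ t)
      = L.foldl (fun r' q => PySem.List.pySetD r' q.2 (s ++ "_" ++ PySem.Int.toStr q.1)) r ++ t := by
  induction L generalizing r with
  | nil => rfl
  | cons q L ih =>
    obtain ⟨h0, h1⟩ := h q (List.mem_cons_self ..)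
    simp only [List.foldl_cons]
    rw [PySem.List.pySetD_of_nonneg _ _ h0, PySem.List.pySetD_of_nonneg _ _ h0,
      List.set_append_left _ _ (by omega)]
    rw [ih _ (fun q hq => by simpa [List.length_set] using h q (List.mem_cons_of_mem _ hq))]

theorem WG_len (s : String) (idxs : List Int) (r : List String) :
    (pvWriteGroup s idxs r).length = r.length := by
  cases idxs with
  | nil => rfl
  | cons i0 rest => rw [pvWriteGroup, inner_len, PySem.List.length_pySetD]

theorem WG_append (s : String) (idxs : List Int) (r t : List String)
    (h : ∀ i ∈ idxs, 0 ≤ i ∧ i < (r.length : Int)) :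
    pvWriteGroup s idxs (r ++ t) = pvWriteGroup s idxs r ++ t := by
  cases idxs with
  | nil => rfl
  | cons i0 rest =>
    obtain ⟨h0, h1⟩ := h i0 (List.mem_cons_self ..)
    simp only [pvWriteGroup]
    rw [PySem.List.pySetD_of_nonneg _ _ h0, PySem.List.pySetD_of_nonneg _ _ h0,
      List.set_append_left _ _ (by omega)]
    refine inner_append _ _ _ _ (fun q hq => ?_)
    rcases (PySem.List.mem_enumerate_iff _ _ _).mp hq with ⟨k, hk, rfl⟩
    simpa [List.length_set] using h _ (List.mem_cons_of_mem _ (List.getElem_mem hk))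

theorem WG_snoc (s : String) (i0 : Int) (rest : List Int) (r : List String) (c : String)
    (h0 : 0 ≤ i0 ∧ i0 < (r.length : Int)) (h : ∀ i ∈ rest, 0 ≤ i ∧ i < (r.length : Int)) :
    pvWriteGroup s ((i0 :: rest) ++ [(r.length : Int)]) (r ++ [c])
      = pvWriteGroup s (i0 :: rest) r ++ [s ++ "_" ++ PySem.Int.toStr (2 + (rest.length : Int))] := by
  simp only [List.cons_append, pvWriteGroup]
  rw [PySem.List.enumerate_append, List.foldl_append]
  rw [PySem.List.pySetD_of_nonneg _ _ h0.1, PySem.List.pySetD_of_nonneg _ _ h0.1,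
    List.set_append_left _ _ (by omega)]
  rw [inner_append _ _ _ _ (fun q hq => by
    rcases (PySem.List.mem_enumerate_iff _ _ _).mp hq with ⟨k, hk, rfl⟩
    simpa [List.length_set] using h _ (List.getElem_mem hk))]
  simp only [PySem.List.enumerate_cons, PySem.List.enumerate_nil, List.foldl_cons, List.foldl_nil]
  have hL : (List.foldl (fun r' q => PySem.List.pySetD r' q.2 (s ++ "_" ++ PySem.Int.toStr q.1))
      (List.set r i0.toNat s) (PySem.List.enumerate rest 2)).length = r.length := by
    rw [inner_len, List.length_set]
  rw [PySem.List.pySetD_of_nonneg _ _ (by positivity)]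
  rw [show ((r.length : Int)).toNat = r.length from by omega, ← hL]
  simp

def pvFW (items : List (String × List Int)) (r : List String) : List String :=
  items.foldl (fun r gi => pvWriteGroup gi.1 gi.2 r) r

theorem FW_len (items : List (String × List Int)) (r : List String) :
    (pvFW items r).length = r.length := by
  induction items generalizing r with
  | nil => rfl
  | cons gi items ih => rw [pvFW, List.foldl_cons, ← pvFW, ih, WG_len]

theorem FW_append (items : List (String × List Int)) (r t : List String)
    (h : ∀ gi ∈ items, ∀ i ∈ gi.2, 0 ≤ i ∧ i < (r.length : Int)) :
    pvFW items (r ++ t) = pvFW items r ++ t := by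
  induction items generalizing r with
  | nil => rfl
  | cons gi items ih =>
    simp only [pvFW, List.foldl_cons]
    rw [WG_append _ _ _ _ (h gi (List.mem_cons_self ..)), ← pvFW, ← pvFW,
      ih _ (fun gj hj i hi => by
        have := h gj (List.mem_cons_of_mem _ hj) i hi
        rwa [WG_len])]

theorem B_eq (xs : List String) :
    disambiguate_syllables_alt xs
      = pvFW ((PySem.Set.ofList xs).map (fun s => (s, posOf xs s))) (List.replicate xs.length "") := by
  show (pvGroups xs).items.foldl (fun r gi => pvWriteGroup gi.1 gi.2 r)
      (List.replicate xs.length "") = _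
  rw [items_pvGroups]
  rfl

theorem pvFW_app (l₁ l₂ : List (String × List Int)) (r : List String) :
    pvFW (l₁ ++ l₂) r = pvFW l₂ (pvFW l₁ r) := List.foldl_append ..

theorem pvFW_cons (gi : String × List Int) (l : List (String × List Int)) (r : List String) :
    pvFW (gi :: l) r = pvFW l (pvWriteGroup gi.1 gi.2 r) := rfl

theorem B_append (xs : List String) (x : String) :
    disambiguate_syllables_alt (xs ++ [x]) = disambiguate_syllables_alt xs ++ [pvLabel xs x] := by
  rw [B_eq, B_eq]
  have hrepl : List.replicate (xs ++ [x]).length ("" : String)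
      = List.replicate xs.length "" ++ [""] := by
    simp [List.replicate_succ']
  have hofl : PySem.Set.ofList (xs ++ [x]) = PySem.Set.add (PySem.Set.ofList xs) x := by
    rw [PySem.Set.ofList_eq_foldl, PySem.Set.ofList_eq_foldl, List.foldl_append]; rfl
  have hbnd : ∀ (S' : List String) (r' : List String), r'.length = xs.length →
      ∀ gi ∈ S'.map (fun s => (s, posOf xs s)), ∀ i ∈ gi.2, 0 ≤ i ∧ i < (r'.length : Int) := by
    intro S' r' hr gi hgi i hi
    obtain ⟨s, _, rfl⟩ := List.mem_map.mp hgi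
    rw [hr]
    exact posOf_bounds xs s i hi
  rw [hrepl, hofl]
  by_cases hx : x ∈ xs
  · have hadd : PySem.Set.add (PySem.Set.ofList xs) x = PySem.Set.ofList xs := by
      simp [PySem.Set.add, PySem.Set.mem_ofList, hx]
    rw [hadd]
    obtain ⟨S₁, S₂, hS⟩ := List.append_of_mem (show x ∈ PySem.Set.ofList xs by
      simp [PySem.Set.mem_ofList, hx])
    have hnd : (S₁ ++ x :: S₂).Nodup := hS ▸ PySem.Set.nodup_ofList xs
    have hx1 : x ∉ S₁ := fun h =>
      (List.disjoint_of_nodup_append hnd) h (List.mem_cons_self ..)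
    have hx2 : x ∉ S₂ := (List.nodup_cons.mp hnd.of_append_right).1
    have hmem : ∀ s ∈ S₁ ++ x :: S₂, s ∈ xs := by
      intro s hs
      have : s ∈ PySem.Set.ofList xs := hS ▸ hs
      simpa [PySem.Set.mem_ofList] using this
    have hm1 : ∀ S' : List String, x ∉ S' →
        S'.map (fun s => (s, posOf (xs ++ [x]) s)) = S'.map (fun s => (s, posOf xs s)) := by
      intro S' hxS
      refine List.map_congr_left (fun s hs => ?_)
      rw [posOf_append, if_neg (fun h => hxS (by rw [h]; exact hs)), List.append_nil]
    rw [hS, List.map_append, List.map_cons, List.map_append, List.map_cons,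
      hm1 S₁ hx1, hm1 S₂ hx2, pvFW_app, pvFW_app]
    rw [show posOf (xs ++ [x]) x = posOf xs x ++ [(xs.length : Int)] from by
      rw [posOf_append, if_pos rfl]]
    have hR₁ : (pvFW (S₁.map (fun s => (s, posOf xs s))) (List.replicate xs.length "")).length
        = xs.length := by rw [FW_len, List.length_replicate]
    set R₁ := pvFW (S₁.map (fun s => (s, posOf xs s))) (List.replicate xs.length "") with hR₁def
    have hstep1 : pvFW (S₁.map (fun s => (s, posOf xs s))) (List.replicate xs.length "" ++ [""])
        = R₁ ++ [""] :=
      FW_append _ _ _ (hbnd S₁ _ (List.length_replicate ..))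
    rw [hstep1]
    obtain ⟨i0, rest, hne⟩ : ∃ i0 rest, posOf xs x = i0 :: rest := by
      rcases h' : posOf xs x with _ | ⟨i0, rest⟩
      · exfalso
        have hl := posOf_length xs x
        rw [h'] at hl
        have hp := List.count_pos_iff.mpr hx
        simp at hl
        omega
      · exact ⟨i0, rest, rfl⟩
    have hcount : xs.count x = rest.length + 1 := by
      rw [← posOf_length, hne]; simp
    have hbds : ∀ i ∈ posOf xs x, 0 ≤ i ∧ i < (R₁.length : Int) := by
      intro i hi; rw [hR₁]; exact posOf_bounds xs x i hi
    rw [hne]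
    rw [show ((xs.length : Int)) = (R₁.length : Int) from by rw [hR₁]]
    rw [pvFW_cons, pvFW_cons,
      WG_snoc x i0 rest R₁ "" (hbds i0 (hne ▸ List.mem_cons_self ..))
        (fun i hi => hbds i (hne ▸ List.mem_cons_of_mem _ hi))]
    have hR₂ : (pvWriteGroup x (i0 :: rest) R₁).length = xs.length := by rw [WG_len, hR₁]
    rw [FW_append _ _ _ (hbnd S₂ _ hR₂)]
    have hlab : pvLabel xs x = x ++ "_" ++ PySem.Int.toStr (2 + (rest.length : Int)) := by
      unfold pvLabel
      rw [if_neg (by omega)]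
      have : ((xs.count x : Int) + 1) = 2 + (rest.length : Int) := by
        rw [hcount]; push_cast; ring
      rw [this]
    rw [hlab]
  · have hadd : PySem.Set.add (PySem.Set.ofList xs) x = PySem.Set.ofList xs ++ [x] := by
      simp [PySem.Set.add, PySem.Set.contains, PySem.Set.mem_ofList, hx]
    have hxS : x ∉ PySem.Set.ofList xs := fun h => hx (by simpa [PySem.Set.mem_ofList] using h)
    have hm1 : (PySem.Set.ofList xs).map (fun s => (s, posOf (xs ++ [x]) s))
        = (PySem.Set.ofList xs).map (fun s => (s, posOf xs s)) := by
      refine List.map_congr_left (fun s hs => ?_)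
      rw [posOf_append, if_neg (fun h => hxS (by rw [h]; exact hs)), List.append_nil]
    rw [hadd, List.map_append, List.map_cons, List.map_nil, hm1, pvFW_app]
    rw [show posOf (xs ++ [x]) x = [(xs.length : Int)] from by
      rw [posOf_append, if_pos rfl, posOf_eq_nil xs x hx, List.nil_append]]
    rw [FW_append _ _ _ (hbnd _ _ (List.length_replicate ..))]
    have hRlen : (pvFW ((PySem.Set.ofList xs).map (fun s => (s, posOf xs s)))
        (List.replicate xs.length "")).length = xs.length := by
      rw [FW_len, List.length_replicate]
    set R := pvFW ((PySem.Set.ofList xs).map (fun s => (s, posOf xs s)))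
      (List.replicate xs.length "") with hRdef
    have hlab : pvLabel xs x = x := by
      unfold pvLabel
      rw [if_pos (List.count_eq_zero_of_not_mem hx)]
    rw [hlab]
    show pvWriteGroup x [(xs.length : Int)] (R ++ [""]) = R ++ [x]
    simp only [pvWriteGroup, PySem.List.enumerate_nil, List.foldl_nil]
    rw [PySem.List.pySetD_of_nonneg _ _ (by positivity)]
    rw [show ((xs.length : Int)).toNat = xs.length from by omega, ← hRlen]
    simp

theorem eqAll (xs : List String) :
    disambiguate_syllables xs = disambiguate_syllables_alt xs := by
  induction xs using List.reverseRecOn with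
  | nil => rfl
  | append_singleton xs x ih => rw [A_append, B_append, ih]

-- ===== VERDICT (by name: the statement is the Claim_ definition above) =====
theorem disambiguate_syllables_spec : Claim_equal_disambiguate_syllables := by
  intro syllables _
  unfold Spec_disambiguate_syllables
  exact eqAll syllables
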